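-- pv_equiv track=rewrite | github.com/wlool8793-crypto/lool- | deep-agent/app/agents/nodes/planning_node.py | _generate_validation_recommendations
-- ===== SOURCE A (Python) =====
-- from typing import Dict, Any, List, Optional, Tuple
--
-- def _generate_validation_recommendations(issues: List[str]) -> List[str]:
--     """
--     Generate recommendations for validation issues
--     """
--     recommendations = []
--
--     for issue in issues:
--         if "Missing required tools" in issue:
--             recommendations.append("Install missing tools or find alternatives")
--         elif "Dependency cycles" in issue:
--             recommendations.append("Restructure task dependencies")
--         elif "Estimated time exceeds" in issue:
--             recommendations.append("Break down into smaller subtasks")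
--
--     return recommendations
-- ===== SOURCE B (Python) =====
-- from typing import List
--
-- _RULES = [
--     ("Missing required tools", "Install missing tools or find alternatives"),
--     ("Dependency cycles", "Restructure task dependencies"),
--     ("Estimated time exceeds", "Break down into smaller subtasks"),
-- ]
--
-- def _generate_validation_recommendations(issues: List[str]) -> List[str]:
--     # Transposed traversal: one labeling pass over the whole list per rule.
--     # Earlier rules claim a position first, so priority order is preserved.
--     labels = [None] * len(issues)
--     for pattern, rec in _RULES:
--         labels = [rec if lab is None and pattern in issue else lab
--                   for issue, lab in zip(issues, labels)]
--     return [lab for lab in labels if lab is not None]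
-- ===== Notes on version B (the rewrite author's own statement) =====
-- stated objective: alternative
-- what changed: Transposed the loop nesting: instead of an if/elif chain per issue, B makes one labeling pass over the whole issue list per rule, filling a parallel labels array (earlier rules claim positions first), then emits the non-None labels in issue order.
import Mathlib
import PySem

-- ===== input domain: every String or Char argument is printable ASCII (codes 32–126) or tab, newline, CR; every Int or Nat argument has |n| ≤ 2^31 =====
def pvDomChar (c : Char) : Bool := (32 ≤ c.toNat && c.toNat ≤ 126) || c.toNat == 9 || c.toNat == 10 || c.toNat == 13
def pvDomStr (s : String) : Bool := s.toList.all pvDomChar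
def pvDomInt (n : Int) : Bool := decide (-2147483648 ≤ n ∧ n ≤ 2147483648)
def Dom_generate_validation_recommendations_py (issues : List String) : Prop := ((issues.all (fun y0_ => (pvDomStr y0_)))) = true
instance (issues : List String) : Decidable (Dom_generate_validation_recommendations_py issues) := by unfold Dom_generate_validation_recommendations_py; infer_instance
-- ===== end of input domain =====

-- B transposes the loop nesting: one labeling pass over the issue list per rule into a parallel labels array, then a final filter pass (alternative decomposition, same cost).


-- ===== PORT A =====
def generate_validation_recommendations_py (issues : List String) : List String :=
  issues.foldl (fun recommendations issue =>
    if PySem.Str.isIn "Missing required tools" issue then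
      recommendations ++ ["Install missing tools or find alternatives"]
    else if PySem.Str.isIn "Dependency cycles" issue then
      recommendations ++ ["Restructure task dependencies"]
    else if PySem.Str.isIn "Estimated time exceeds" issue then
      recommendations ++ ["Break down into smaller subtasks"]
    else recommendations) []

-- ===== PORT B =====
def pvRules : List (String × String) :=
  [("Missing required tools", "Install missing tools or find alternatives"),
   ("Dependency cycles", "Restructure task dependencies"),
   ("Estimated time exceeds", "Break down into smaller subtasks")]

-- one labeling pass over the whole issue list for one rule (port of the per-rule list comprehension)
def pvLabelPass (pat rec : String) (issues : List String) (labels : List (Option String)) : List (Option String) :=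
  List.zipWith (fun issue lab => if lab.isNone && PySem.Str.isIn pat issue then some rec else lab) issues labels

def generate_validation_recommendations_py_alt (issues : List String) : List String :=
  let labels := pvRules.foldl (fun labels pr => pvLabelPass pr.1 pr.2 issues labels)
    (issues.map (fun _ => (none : Option String)))
  labels.filterMap id

-- ===== PRECONDITION & SPEC =====
def Spec_generate_validation_recommendations_py (issues : List String) (out : List String) : Prop := out = generate_validation_recommendations_py_alt issues
instance (issues : List String) (out : List String) : Decidable (Spec_generate_validation_recommendations_py issues out) := by unfold Spec_generate_validation_recommendations_py; infer_instance

-- ===== CLAIM (what is proved, stated in full; the proofs are below) =====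
def Claim_equal_generate_validation_recommendations_py : Prop := ∀ (issues : List String), Dom_generate_validation_recommendations_py issues → Spec_generate_validation_recommendations_py issues (generate_validation_recommendations_py issues)

-- ===== LEMMAS AND PROOFS =====

-- the per-issue label the three staged passes compute
def pvChain (issue : String) : Option String :=
  if PySem.Str.isIn "Missing required tools" issue then some "Install missing tools or find alternatives"
  else if PySem.Str.isIn "Dependency cycles" issue then some "Restructure task dependencies"
  else if PySem.Str.isIn "Estimated time exceeds" issue then some "Break down into smaller subtasks"
  else none

lemma pv_labels_eq (issues : List String) :
    pvRules.foldl (fun labels pr => pvLabelPass pr.1 pr.2 issues labels)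
      (issues.map (fun _ => (none : Option String)))
    = issues.map pvChain := by
  induction issues with
  | nil => rfl
  | cons issue rest ih =>
    simp only [pvRules, List.foldl, pvLabelPass, List.map_cons, List.zipWith_cons_cons] at ih ⊢
    simp only [pvChain]
    split_ifs <;> simp_all

lemma pv_foldl_eq (issues : List String) (acc : List String) :
    issues.foldl (fun recommendations issue =>
      if PySem.Str.isIn "Missing required tools" issue then
        recommendations ++ ["Install missing tools or find alternatives"]
      else if PySem.Str.isIn "Dependency cycles" issue then
        recommendations ++ ["Restructure task dependencies"]
      else if PySem.Str.isIn "Estimated time exceeds" issue then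
        recommendations ++ ["Break down into smaller subtasks"]
      else recommendations) acc
    = acc ++ (issues.map pvChain).filterMap id := by
  induction issues generalizing acc with
  | nil => simp
  | cons issue rest ih =>
    simp only [List.foldl_cons, List.map_cons, List.filterMap_cons, ih, pvChain]
    split_ifs <;> simp

-- ===== VERDICT (by name: the statement is the Claim_ definition above) =====
theorem generate_validation_recommendations_py_spec : Claim_equal_generate_validation_recommendations_py := by
  intro issues _
  unfold Spec_generate_validation_recommendations_py generate_validation_recommendations_py
    generate_validation_recommendations_py_alt
  simp only [pv_labels_eq]
  simpa using pv_foldl_eq issues []
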